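-- pv_equiv track=rewrite | github.com/miliar/Code_Jam_Webscraper | solutions_python/Problem_177/4473.py | counting_sheep
-- ===== SOURCE A (Python) =====
-- def counting_sheep(number):
-- 	base=set(['0','1','2','3','4','5','6','7','8','9'])
-- 	compare=set()
-- 	for i in range(100):
-- 		result=str(int(number)*(i+1))
-- 		for digit in result:
-- 			if digit not in compare:
-- 				compare.add(digit)
-- 				if compare==base:
-- 					return result
-- 	else:
-- 		return 'INSOMNIA'
-- ===== SOURCE B (Python) =====
-- def counting_sheep(number):
--     n = int(number)
--     if n <= 0:
--         return 'INSOMNIA'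
--     last = 0
--     for d in '0123456789':
--         k = next((k for k in range(1, 101) if d in str(n * k)), None)
--         if k is None:
--             return 'INSOMNIA'
--         last = max(last, k)
--     return str(n * last)
-- ===== Notes on version B (the rewrite author's own statement) =====
-- stated objective: alternative
-- what changed: B decomposes the task per digit: for each of the ten digits it independently finds the first multiple k in 1..100 whose decimal string contains that digit, and returns n times the maximum of these first occurrences (with an up-front n <= 0 guard), instead of A's single ordered scan over multiples accumulating a seen-digit set with a mid-scan set-equality test.
import Mathlib
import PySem

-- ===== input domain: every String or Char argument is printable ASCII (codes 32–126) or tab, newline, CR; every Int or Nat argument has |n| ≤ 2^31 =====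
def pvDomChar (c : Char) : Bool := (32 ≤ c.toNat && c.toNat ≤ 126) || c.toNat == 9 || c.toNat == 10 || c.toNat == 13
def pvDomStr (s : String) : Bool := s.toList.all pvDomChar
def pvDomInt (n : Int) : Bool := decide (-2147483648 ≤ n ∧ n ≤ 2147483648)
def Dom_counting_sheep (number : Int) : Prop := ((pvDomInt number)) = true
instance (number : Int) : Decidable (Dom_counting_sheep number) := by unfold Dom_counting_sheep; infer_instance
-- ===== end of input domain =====

-- B is an 'alternative' decomposition: instead of A's single scan over the multiples n*1..n*100
-- accumulating a seen-digit set, B searches, for each of the ten digits separately, the first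
-- multiple (k ≤ 100) containing it, and returns n times the maximum of those first occurrences
-- (guarding n ≤ 0, where no positive multiple can ever show all ten digits).

-- ===== PORT A =====
-- base = set(['0',...,'9'])
def csBase : PySem.Set Char :=
  PySem.Set.ofList ['0','1','2','3','4','5','6','7','8','9']

-- inner 'for digit in result' loop: returns (some result) on the early 'return result', else
-- (none, updated compare)
def csInner (result : String) : List Char → PySem.Set Char → Option String × PySem.Set Char
  | [], compare => (none, compare)
  | d :: ds, compare =>
    if PySem.Set.contains compare d then csInner result ds compare
    else
      let compare' := PySem.Set.add compare d
      if PySem.Set.equal compare' csBase then (some result, compare')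
      else csInner result ds compare'

-- outer 'for i in range(100)' loop with the for-else 'INSOMNIA'
def csOuter (number : Int) : List Int → PySem.Set Char → String
  | [], _ => "INSOMNIA"
  | i :: is, compare =>
    let result := PySem.Int.toStr (number * (i + 1))
    match csInner result result.toList compare with
    | (some r, _) => r
    | (none, compare') => csOuter number is compare'

def counting_sheep (number : Int) : String :=
  csOuter number (PySem.List.pyRange 0 100 1) PySem.Set.empty

-- ===== PORT B =====
-- k = next((k for k in range(1, 101) if d in str(n * k)), None)
def altFirstK (n : Int) (d : Char) : Option Int :=
  (PySem.List.pyRange 1 101 1).find? (fun k => (PySem.Int.toStr (n * k)).toList.contains d)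

-- for d in '0123456789': … last = max(last, k)  — with the early 'return INSOMNIA'
def altLoop (n : Int) : List Char → Int → String
  | [], last => PySem.Int.toStr (n * last)
  | d :: ds, last =>
    match altFirstK n d with
    | none => "INSOMNIA"
    | some k => altLoop n ds (max last k)

def counting_sheep_alt (number : Int) : String :=
  if number ≤ 0 then "INSOMNIA" else altLoop number "0123456789".toList 0

-- ===== PRECONDITION & SPEC =====
def Spec_counting_sheep (number : Int) (out : String) : Prop := out = counting_sheep_alt number
instance (number : Int) (out : String) : Decidable (Spec_counting_sheep number out) := by unfold Spec_counting_sheep; infer_instance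

-- ===== CLAIM (what is proved, stated in full; the proofs are below) =====
def Claim_equal_counting_sheep : Prop := ∀ (number : Int), Dom_counting_sheep number → Spec_counting_sheep number (counting_sheep number)

-- ===== LEMMAS AND PROOFS =====

-- the 10-bit digit mask of a natural number: 'which digits occur in v'
def altDigitMask (v : Nat) (mask : Nat) : Nat :=
  if v = 0 then mask else altDigitMask (v / 10) (mask ||| (1 <<< (v % 10)))
termination_by v
decreasing_by exact Nat.div_lt_self (Nat.pos_of_ne_zero (by assumption)) (by norm_num)

def gmask (n : Int) (k : Int) : Nat := altDigitMask (n * k).toNat 0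

-- abstraction of A's outer loop: the multiplier at which the accumulated mask completes
def maskRunK (n : Int) : List Int → Nat → Option Int
  | [], _ => none
  | k :: ks, m =>
    if m ||| gmask n k = 1023 then some k else maskRunK n ks (m ||| gmask n k)

-- abstraction of A's inner loop over a char list, as a bit mask
def charMask : List Char → Nat → Nat
  | [], mask => mask
  | c :: cs, mask => charMask cs (mask ||| (1 <<< (c.toNat - 48)))

-- the state relation between A's 'compare' set and the mask abstraction
def RelCS (s : PySem.Set Char) (mask : Nat) : Prop :=
  mask < 1024 ∧ ∀ c, c ∈ s ↔ ∃ d, d < 10 ∧ mask.testBit d ∧ c = Nat.digitChar d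

theorem digitChar_inj_lt10 : ∀ d < 10, ∀ e < 10, Nat.digitChar d = Nat.digitChar e → d = e := by
  decide

theorem digitChar_toNat_sub : ∀ d < 10, (Nat.digitChar d).toNat - 48 = d := by decide

theorem digitChar_mem_base : ∀ d < 10, Nat.digitChar d ∈ csBase := by decide

theorem mem_base_exists (c : Char) (h : c ∈ csBase) : ∃ d, d < 10 ∧ c = Nat.digitChar d := by
  simp only [csBase, PySem.Set.mem_ofList] at h
  fin_cases h
  · exact ⟨0, by norm_num, rfl⟩
  · exact ⟨1, by norm_num, rfl⟩
  · exact ⟨2, by norm_num, rfl⟩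
  · exact ⟨3, by norm_num, rfl⟩
  · exact ⟨4, by norm_num, rfl⟩
  · exact ⟨5, by norm_num, rfl⟩
  · exact ⟨6, by norm_num, rfl⟩
  · exact ⟨7, by norm_num, rfl⟩
  · exact ⟨8, by norm_num, rfl⟩
  · exact ⟨9, by norm_num, rfl⟩

theorem isDigit_exists (c : Char) (h : c.isDigit = true) : ∃ d, d < 10 ∧ c = Nat.digitChar d := by
  simp [Char.isDigit] at h
  obtain ⟨h1, h2⟩ := h
  have hv : c.toNat ≤ 57 := by exact_mod_cast UInt32.le_iff_toNat_le.mp h2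
  have hv1 : 48 ≤ c.toNat := by exact_mod_cast UInt32.le_iff_toNat_le.mp h1
  refine ⟨c.toNat - 48, by omega, ?_⟩
  have h3 : ∀ m, m < 58 → 48 ≤ m → Char.ofNat m = Nat.digitChar (m - 48) := by decide
  rw [← h3 c.toNat (by omega) hv1, Char.ofNat_toNat]

theorem testBit_1023 : ∀ d < 10, Nat.testBit 1023 d = true := by decide

theorem or_shift_eq_of_testBit (m d : Nat) (h : m.testBit d = true) : m ||| 1 <<< d = m := by
  apply Nat.eq_of_testBit_eq
  intro i
  rw [Nat.testBit_or, Nat.one_shiftLeft, Nat.testBit_two_pow]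
  by_cases hid : d = i
  · subst hid; simp [h]
  · simp [hid]

theorem testBit_or_shift (m d i : Nat) :
    (m ||| 1 <<< d).testBit i = (m.testBit i || decide (d = i)) := by
  rw [Nat.testBit_or, Nat.one_shiftLeft, Nat.testBit_two_pow]

theorem or_lt_1024 (a b : Nat) (ha : a < 1024) (hb : b < 1024) : a ||| b < 1024 := by
  have h2 : a < 2 ^ 10 := by norm_num [ha]
  have h3 : b < 2 ^ 10 := by norm_num [hb]
  have := Nat.or_lt_two_pow h2 h3
  norm_num at this
  exact this

theorem or_shift_lt (m d : Nat) (hm : m < 1024) (hd : d < 10) : m ||| 1 <<< d < 1024 := by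
  have h1 : 1 <<< d < 1024 := by
    rw [Nat.one_shiftLeft]
    calc (2:Nat) ^ d ≤ 2 ^ 9 := Nat.pow_le_pow_right (by norm_num) (by omega)
    _ < 1024 := by norm_num
  exact or_lt_1024 m (1 <<< d) hm h1

theorem altDigitMask_eq (v m : Nat) :
    altDigitMask v m = if v = 0 then m else altDigitMask (v / 10) (m ||| (1 <<< (v % 10))) := by
  rw [altDigitMask]

theorem altDigitMask_or (v m x : Nat) :
    altDigitMask v (m ||| x) = altDigitMask v m ||| x := by
  induction v using Nat.strong_induction_on generalizing m x with
  | _ v ih =>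
    by_cases hv : v = 0
    · subst hv; simp [altDigitMask_eq]
    · rw [altDigitMask_eq v (m ||| x), altDigitMask_eq v m, if_neg hv, if_neg hv,
        Nat.or_right_comm, ih (v / 10) (Nat.div_lt_self (Nat.pos_of_ne_zero hv) (by norm_num))]

theorem altDigitMask_eq_or (v m : Nat) : altDigitMask v m = m ||| altDigitMask v 0 := by
  have h := altDigitMask_or v 0 m
  rw [Nat.zero_or] at h
  rw [h, Nat.or_comm]

theorem altDigitMask_lt (v m : Nat) (hm : m < 1024) : altDigitMask v m < 1024 := by
  induction v using Nat.strong_induction_on generalizing m with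
  | _ v ih =>
    by_cases hv : v = 0
    · subst hv; simpa [altDigitMask_eq] using hm
    · rw [altDigitMask_eq, if_neg hv]
      exact ih (v / 10) (Nat.div_lt_self (Nat.pos_of_ne_zero hv) (by norm_num)) _
        (or_shift_lt m (v % 10) hm (Nat.mod_lt _ (by norm_num)))

theorem gmask_lt (n k : Int) : gmask n k < 1024 := altDigitMask_lt _ 0 (by norm_num)

theorem charMask_append (xs ys : List Char) (m : Nat) :
    charMask (xs ++ ys) m = charMask ys (charMask xs m) := by
  induction xs generalizing m with
  | nil => rfl
  | cons c xs ih => simp only [List.cons_append, charMask, ih]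

-- the two digit extractions agree: chars of toDigits vs %10 / //10 (for positive v)
theorem charMask_toDigits (v : Nat) (hv : 0 < v) (m : Nat) :
    charMask (Nat.toDigits 10 v) m = altDigitMask v m := by
  induction v using Nat.strong_induction_on generalizing m with
  | _ v ih =>
    by_cases h10 : v < 10
    · rw [Nat.toDigits_of_lt_base h10]
      simp only [charMask]
      rw [digitChar_toNat_sub v h10]
      rw [altDigitMask_eq, if_neg (by omega), Nat.mod_eq_of_lt h10,
        altDigitMask_eq, Nat.div_eq_of_lt h10, if_pos rfl]
    · rw [Nat.toDigits_of_base_le (by norm_num) (by omega), charMask_append]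
      simp only [charMask]
      rw [digitChar_toNat_sub (v % 10) (Nat.mod_lt _ (by norm_num))]
      rw [ih (v / 10) (Nat.div_lt_self hv (by norm_num)) (by omega) m,
        altDigitMask_eq v m, if_neg (by omega), altDigitMask_or]

theorem charMask_full (cs : List Char) (hcs : ∀ c ∈ cs, c.isDigit = true) :
    charMask cs 1023 = 1023 := by
  induction cs with
  | nil => rfl
  | cons c cs ih =>
    obtain ⟨d, hd, rfl⟩ := isDigit_exists c (hcs c (by simp))
    simp only [charMask]
    rw [digitChar_toNat_sub d hd, or_shift_eq_of_testBit _ _ (testBit_1023 d hd)]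
    exact ih (fun c hc => hcs c (by simp [hc]))

-- equality with the base set ↔ mask = 1023
theorem equal_base_iff (s : PySem.Set Char) (mask : Nat) (h : RelCS s mask) :
    (PySem.Set.equal s csBase = true) ↔ mask = 1023 := by
  obtain ⟨hlt, hmem⟩ := h
  rw [PySem.Set.equal_iff]
  constructor
  · intro heq
    apply Nat.eq_of_testBit_eq
    intro i
    by_cases hi : i < 10
    · rw [testBit_1023 i hi]
      have : Nat.digitChar i ∈ s := (heq _).mpr (digitChar_mem_base i hi)
      obtain ⟨d, hd, hbit, hcd⟩ := (hmem _).mp this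
      rwa [digitChar_inj_lt10 i hi d hd hcd]
    · have h1 : mask.testBit i = false :=
        Nat.testBit_lt_two_pow (lt_of_lt_of_le hlt (by
          calc (1024:Nat) = 2 ^ 10 := by norm_num
          _ ≤ 2 ^ i := Nat.pow_le_pow_right (by norm_num) (by omega)))
      have h2 : Nat.testBit 1023 i = false :=
        Nat.testBit_lt_two_pow (by
          calc (1023:Nat) < 2 ^ 10 := by norm_num
          _ ≤ 2 ^ i := Nat.pow_le_pow_right (by norm_num) (by omega))
      rw [h1, h2]
  · rintro rfl c
    constructor
    · intro hc
      obtain ⟨d, hd, _, rfl⟩ := (hmem c).mp hc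
      exact digitChar_mem_base d hd
    · intro hc
      obtain ⟨d, hd, rfl⟩ := mem_base_exists c hc
      exact (hmem _).mpr ⟨d, hd, testBit_1023 d hd, rfl⟩

-- A's inner loop, related to charMask
theorem csInner_spec (r : String) (cs : List Char) (s : PySem.Set Char) (mask : Nat)
    (hrel : RelCS s mask) (hne : mask ≠ 1023) (hcs : ∀ c ∈ cs, c.isDigit = true) :
    (charMask cs mask = 1023 → (csInner r cs s).1 = some r) ∧
    (charMask cs mask ≠ 1023 →
      (csInner r cs s).1 = none ∧ RelCS (csInner r cs s).2 (charMask cs mask)) := by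
  induction cs generalizing s mask with
  | nil =>
    refine ⟨fun h => absurd h hne, fun _ => ⟨rfl, hrel⟩⟩
  | cons c cs ih =>
    obtain ⟨d, hd, rfl⟩ := isDigit_exists c (hcs c (by simp))
    have hcs' : ∀ c ∈ cs, c.isDigit = true := fun c hc => hcs c (by simp [hc])
    simp only [charMask, csInner]
    rw [digitChar_toNat_sub d hd]
    by_cases hmemc : Nat.digitChar d ∈ s
    · rw [if_pos ((PySem.Set.contains_iff _ _).mpr hmemc)]
      obtain ⟨d', hd', hbit, hcd⟩ := (hrel.2 _).mp hmemc
      have hdd : d = d' := digitChar_inj_lt10 d hd d' hd' hcd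
      rw [or_shift_eq_of_testBit mask d (hdd ▸ hbit)]
      exact ih s mask hrel hne hcs'
    · rw [if_neg (by rw [PySem.Set.contains_iff]; exact hmemc)]
      set mask' := mask ||| 1 <<< d with hmask'
      have hrel' : RelCS (PySem.Set.add s (Nat.digitChar d)) mask' := by
        refine ⟨or_shift_lt mask d hrel.1 hd, fun c => ?_⟩
        rw [PySem.Set.mem_add, hrel.2 c]
        constructor
        · rintro (⟨e, he, hbit, rfl⟩ | rfl)
          · exact ⟨e, he, by rw [testBit_or_shift]; simp [hbit], rfl⟩
          · exact ⟨d, hd, by rw [testBit_or_shift]; simp, rfl⟩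
        · rintro ⟨e, he, hbit, rfl⟩
          rw [testBit_or_shift] at hbit
          rcases Bool.or_eq_true_iff.mp hbit with hb | hb
          · exact Or.inl ⟨e, he, hb, rfl⟩
          · right
            rw [of_decide_eq_true hb]
      by_cases hfull : mask' = 1023
      · rw [if_pos ((equal_base_iff _ _ hrel').mpr hfull)]
        have : charMask cs mask' = 1023 := by rw [hfull, charMask_full cs hcs']
        exact ⟨fun _ => rfl, fun h => absurd this h⟩
      · rw [if_neg (by
          rw [Bool.not_eq_true]
          cases heq : PySem.Set.equal (PySem.Set.add s (Nat.digitChar d)) csBase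
          · rfl
          · exact absurd ((equal_base_iff _ _ hrel').mp heq) hfull)]
        exact ih _ mask' hrel' hfull hcs'

-- chars of str(m) for a positive m are the digit chars of m.toNat
theorem toList_toStr_pos (m : Int) (hm : 0 < m) :
    (PySem.Int.toStr m).toList = Nat.toDigits 10 m.toNat := by
  rw [PySem.Int.toList_toStr, PySem.Int.toChars, if_neg (by omega)]

-- main loop correspondence for positive n: A's outer loop computes maskRunK
theorem outer_pos (n : Int) (hn : 0 < n) (l : List Nat) (s : PySem.Set Char) (mask : Nat)
    (hrel : RelCS s mask) (hne : mask ≠ 1023) :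
    csOuter n (l.map fun (j : Nat) => (j : Int)) s =
      (match maskRunK n (l.map fun (j : Nat) => (j : Int) + 1) mask with
       | some k => PySem.Int.toStr (n * k)
       | none => "INSOMNIA") := by
  induction l generalizing s mask with
  | nil => rfl
  | cons j l ih =>
    rw [List.map_cons, List.map_cons]
    rw [csOuter, maskRunK]
    have hm : 0 < n * ((j : Int) + 1) := by positivity
    have hchars : (PySem.Int.toStr (n * ((j : Int) + 1))).toList
        = Nat.toDigits 10 (n * ((j : Int) + 1)).toNat := toList_toStr_pos _ hm
    have hdig : ∀ c ∈ (PySem.Int.toStr (n * ((j : Int) + 1))).toList, c.isDigit = true := by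
      rw [hchars]
      intro c hc
      exact Nat.isDigit_of_mem_toDigits (by norm_num) (by norm_num) hc
    have hcm : charMask (PySem.Int.toStr (n * ((j : Int) + 1))).toList mask
        = mask ||| gmask n ((j : Int) + 1) := by
      rw [hchars, charMask_toDigits _ (by omega) mask, altDigitMask_eq_or]
      rfl
    obtain ⟨h1, h2⟩ := csInner_spec (PySem.Int.toStr (n * ((j : Int) + 1)))
      (PySem.Int.toStr (n * ((j : Int) + 1))).toList s mask hrel hne hdig
    by_cases hfull : mask ||| gmask n ((j : Int) + 1) = 1023
    · rw [if_pos hfull]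
      have := h1 (by rw [hcm]; exact hfull)
      cases hI : csInner (PySem.Int.toStr (n * ((j : Int) + 1)))
          (PySem.Int.toStr (n * ((j : Int) + 1))).toList s with
      | mk o s' =>
        rw [hI] at this
        rw [show o = some (PySem.Int.toStr (n * ((j : Int) + 1))) from this]
    · rw [if_neg hfull]
      obtain ⟨hnone, hrel'⟩ := h2 (by rw [hcm]; exact hfull)
      cases hI : csInner (PySem.Int.toStr (n * ((j : Int) + 1)))
          (PySem.Int.toStr (n * ((j : Int) + 1))).toList s with
      | mk o s' =>
        rw [hI] at hnone hrel'
        rw [show o = none from hnone]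
        rw [hcm] at hrel'
        exact ih s' _ hrel' hfull

-- negative n: once '-' is in compare, the inner loop never fires the equality check
theorem csInner_dash (r : String) (cs : List Char) (s : PySem.Set Char) (hs : '-' ∈ s) :
    (csInner r cs s).1 = none ∧ '-' ∈ (csInner r cs s).2 := by
  induction cs generalizing s with
  | nil => exact ⟨rfl, hs⟩
  | cons c cs ih =>
    simp only [csInner]
    by_cases hmemc : c ∈ s
    · rw [if_pos ((PySem.Set.contains_iff _ _).mpr hmemc)]
      exact ih s hs
    · rw [if_neg (by rw [PySem.Set.contains_iff]; exact hmemc)]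
      have hdash : '-' ∈ PySem.Set.add s c := (PySem.Set.mem_add _ _ _).mpr (Or.inl hs)
      rw [if_neg (by
        intro heq
        have := (PySem.Set.equal_iff _ _).mp heq
        have : ('-' : Char) ∈ csBase := (this '-').mp hdash
        simp only [csBase, PySem.Set.mem_ofList] at this
        simp at this)]
      exact ih _ hdash

theorem csInner_dash_start (r : String) (cs : List Char) :
    (csInner r ('-' :: cs) PySem.Set.empty).1 = none ∧
      '-' ∈ (csInner r ('-' :: cs) PySem.Set.empty).2 := by
  simp only [csInner]
  rw [if_neg (by decide), if_neg (by decide)]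
  exact csInner_dash r cs _ (by decide)

theorem outer_neg (n : Int) (hn : n < 0) (l : List Int) (hl : ∀ i ∈ l, 0 ≤ i)
    (s : PySem.Set Char) (hs : '-' ∈ s ∨ s = PySem.Set.empty) :
    csOuter n l s = "INSOMNIA" := by
  induction l generalizing s with
  | nil => rfl
  | cons i l ih =>
    simp only [csOuter]
    have hm : n * (i + 1) < 0 := by
      have hi : 0 ≤ i := hl i (by simp)
      have : 0 < i + 1 := by omega
      exact Int.mul_neg_of_neg_of_pos hn this
    have hchars : (PySem.Int.toStr (n * (i + 1))).toList
        = '-' :: Nat.toDigits 10 (n * (i + 1)).natAbs := by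
      rw [PySem.Int.toList_toStr, PySem.Int.toChars, if_pos hm]
    have hl' : ∀ i ∈ l, 0 ≤ i := fun i hi => hl i (by simp [hi])
    rcases hs with hs | hs
    · obtain ⟨hnone, hdash⟩ := csInner_dash (PySem.Int.toStr (n * (i + 1)))
        (PySem.Int.toStr (n * (i + 1))).toList s hs
      cases hI : csInner (PySem.Int.toStr (n * (i + 1)))
          (PySem.Int.toStr (n * (i + 1))).toList s with
      | mk o s' =>
        rw [hI] at hnone hdash
        rw [show o = none from hnone]
        exact ih hl' s' (Or.inl hdash)
    · subst hs
      have h0 := csInner_dash_start (PySem.Int.toStr (n * (i + 1)))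
        (Nat.toDigits 10 (n * (i + 1)).natAbs)
      rw [← hchars] at h0
      obtain ⟨hnone, hdash⟩ := h0
      cases hI : csInner (PySem.Int.toStr (n * (i + 1)))
          (PySem.Int.toStr (n * (i + 1))).toList PySem.Set.empty with
      | mk o s' =>
        rw [hI] at hnone hdash
        rw [show o = none from hnone]
        exact ih hl' s' (Or.inl hdash)

theorem counting_sheep_zero : counting_sheep 0 = "INSOMNIA" := by decide

theorem map_cast_eq_pyRange_a : (List.range 100).map (fun (j : Nat) => (j : Int)) = PySem.List.pyRange 0 100 1 := by
  rw [PySem.List.pyRange_one, show ((100:Int) - 0).toNat = 100 by decide]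
  exact List.map_congr_left (fun j _ => by omega)

theorem map_cast_eq_pyRange_b :
    (List.range 100).map (fun (j : Nat) => (j : Int) + 1) = PySem.List.pyRange 1 101 1 := by
  rw [PySem.List.pyRange_one, show ((101:Int) - 1).toNat = 100 by decide]
  exact List.map_congr_left (fun j _ => by omega)

-- ===== B-side lemmas =====

-- testBit of charMask: a digit bit is set iff some char contributes it
theorem charMask_testBit (cs : List Char) (m : Nat) (e : Nat) :
    (charMask cs m).testBit e = (m.testBit e || cs.any (fun c => decide (c.toNat - 48 = e))) := by
  induction cs generalizing m with
  | nil => simp [charMask]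
  | cons c cs ih =>
    simp only [charMask, List.any_cons]
    rw [ih, testBit_or_shift, Bool.or_assoc]

-- membership of a digit char in an all-digit char list, as a bit test
theorem contains_digit (cs : List Char) (h : ∀ c ∈ cs, c.isDigit = true) (d : Nat) (hd : d < 10) :
    cs.contains (Nat.digitChar d) = cs.any (fun c => decide (c.toNat - 48 = d)) := by
  induction cs with
  | nil => rfl
  | cons c cs ih =>
    obtain ⟨e, he, rfl⟩ := isDigit_exists c (h c (by simp))
    have hbeq : ∀ e < 10, ∀ d < 10,
        ((Nat.digitChar e == Nat.digitChar d) = decide (e = d)) := by decide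
    have hsub : ∀ e < 10, ∀ d < 10, (decide ((Nat.digitChar e).toNat - 48 = d) = decide (e = d)) := by
      decide
    have hdec : decide (d = e) = decide (e = d) := decide_eq_decide.mpr eq_comm
    simp only [List.contains_cons, List.any_cons]
    rw [hbeq d hd e he, hsub e he d hd, ih (fun c hc => h c (by simp [hc])), hdec]

theorem find?_congr_mem {α : Type} (p q : α → Bool) (l : List α) (h : ∀ x ∈ l, p x = q x) :
    l.find? p = l.find? q := by
  induction l with
  | nil => rfl
  | cons x l ih =>
    rw [List.find?_cons, List.find?_cons, h x (by simp)]
    cases q x with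
    | true => rfl
    | false => exact ih (fun x hx => h x (by simp [hx]))

-- B's per-digit search, as a bit test over the multiples
theorem altFirstK_eq (n : Int) (hn : 0 < n) (d : Nat) (hd : d < 10) :
    altFirstK n (Nat.digitChar d) =
      (PySem.List.pyRange 1 101 1).find? (fun k => (gmask n k).testBit d) := by
  unfold altFirstK
  apply find?_congr_mem
  intro k hk
  have hk1 : 1 ≤ k := (PySem.List.mem_pyRange_one.mp hk).1
  have hm : 0 < n * k := by positivity
  have hchars : (PySem.Int.toStr (n * k)).toList = Nat.toDigits 10 (n * k).toNat :=
    toList_toStr_pos _ hm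
  have hdig : ∀ c ∈ (PySem.Int.toStr (n * k)).toList, c.isDigit = true := by
    rw [hchars]
    intro c hc
    exact Nat.isDigit_of_mem_toDigits (by norm_num) (by norm_num) hc
  rw [contains_digit _ hdig d hd, gmask, ← charMask_toDigits _ (by omega) 0,
    charMask_testBit, Nat.zero_testBit, Bool.false_or, hchars]

theorem exists_missing (m : Nat) (hm : m < 1024) (hne : m ≠ 1023) :
    ∃ d, d < 10 ∧ m.testBit d = false := by
  by_contra h
  push Not at h
  apply hne
  apply Nat.eq_of_testBit_eq
  intro i
  by_cases hi : i < 10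
  · rw [testBit_1023 i hi]
    have := h i hi
    cases hb : m.testBit i
    · exact absurd hb this
    · rfl
  · rw [Nat.testBit_lt_two_pow (lt_of_lt_of_le hm (by
        calc (1024:Nat) = 2 ^ 10 := by norm_num
        _ ≤ 2 ^ i := Nat.pow_le_pow_right (by norm_num) (by omega))),
      Nat.testBit_lt_two_pow (by
        calc (1023:Nat) < 2 ^ 10 := by norm_num
        _ ≤ 2 ^ i := Nat.pow_le_pow_right (by norm_num) (by omega))]

theorem find?_cons_pos {α : Type} (p : α → Bool) (a : α) (l : List α) (h : p a = true) :
    (a :: l).find? p = some a := by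
  simp [h]

theorem find?_cons_neg {α : Type} (p : α → Bool) (a : α) (l : List α) (h : p a = false) :
    (a :: l).find? p = l.find? p := by
  simp [h]

theorem maskRunK_mem (n : Int) (ks : List Int) (m : Nat) (K : Int)
    (h : maskRunK n ks m = some K) : K ∈ ks := by
  induction ks generalizing m with
  | nil => exact absurd h (by simp [maskRunK])
  | cons k ks ih =>
    rw [maskRunK] at h
    split_ifs at h with hf
    · simp at h
      simp [h]
    · exact List.mem_cons_of_mem _ (ih _ h)

-- the heart of the equivalence: A's first-full-prefix multiplier vs B's per-digit first hits
theorem maskRunK_spec (n : Int) (ks : List Int) (m : Nat) (hm : m < 1024) (hne : m ≠ 1023)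
    (hsort : ks.Pairwise (· < ·)) :
    (maskRunK n ks m = none ↔
      ∃ d, d < 10 ∧ m.testBit d = false ∧
        ks.find? (fun k => (gmask n k).testBit d) = none)
    ∧ (∀ K, maskRunK n ks m = some K →
        (∀ d, d < 10 → m.testBit d = false →
          ∃ k, ks.find? (fun k => (gmask n k).testBit d) = some k ∧ k ≤ K)
        ∧ (∃ d, d < 10 ∧ m.testBit d = false ∧
            ks.find? (fun k => (gmask n k).testBit d) = some K)) := by
  induction ks generalizing m with
  | nil =>
    refine ⟨⟨fun _ => ?_, fun _ => rfl⟩, fun K hK => absurd hK (by simp [maskRunK])⟩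
    obtain ⟨d, hd, hb⟩ := exists_missing m hm hne
    exact ⟨d, hd, hb, rfl⟩
  | cons k ks ih =>
    have hsort' : ks.Pairwise (· < ·) := hsort.of_cons
    have hklt : ∀ x ∈ ks, k < x := fun x hx => (List.pairwise_cons.mp hsort).1 x hx
    by_cases hfull : m ||| gmask n k = 1023
    · -- A completes at k
      constructor
      · rw [maskRunK, if_pos hfull]
        simp only [false_iff, reduceCtorEq, not_exists]
        intro d ⟨hd, hb, hfind⟩
        have hgk : (gmask n k).testBit d = true := by
          have : (m ||| gmask n k).testBit d = true := by rw [hfull]; exact testBit_1023 d hd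
          rw [Nat.testBit_or, hb, Bool.false_or] at this
          exact this
        rw [find?_cons_pos (fun k => (gmask n k).testBit d) k ks hgk] at hfind
        exact absurd hfind (by simp)
      · intro K hK
        rw [maskRunK, if_pos hfull] at hK
        have hKk : k = K := by simpa using hK
        subst hKk
        constructor
        · intro d hd hb
          have hgk : (gmask n k).testBit d = true := by
            have : (m ||| gmask n k).testBit d = true := by rw [hfull]; exact testBit_1023 d hd
            rw [Nat.testBit_or, hb, Bool.false_or] at this
            exact this
          exact ⟨k, find?_cons_pos (fun k => (gmask n k).testBit d) k ks hgk, le_refl k⟩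
        · obtain ⟨d, hd, hb⟩ := exists_missing m hm hne
          have hgk : (gmask n k).testBit d = true := by
            have : (m ||| gmask n k).testBit d = true := by rw [hfull]; exact testBit_1023 d hd
            rw [Nat.testBit_or, hb, Bool.false_or] at this
            exact this
          exact ⟨d, hd, hb, find?_cons_pos (fun k => (gmask n k).testBit d) k ks hgk⟩
    · -- A continues with m' = m ||| gmask n k
      have hrun : maskRunK n (k :: ks) m = maskRunK n ks (m ||| gmask n k) := by
        rw [maskRunK, if_neg hfull]
      have hm' : m ||| gmask n k < 1024 := or_lt_1024 _ _ hm (gmask_lt n k)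
      obtain ⟨ihnone, ihsome⟩ := ih (m ||| gmask n k) hm' hfull hsort'
      have hbit' : ∀ d, (m ||| gmask n k).testBit d = false ↔
          (m.testBit d = false ∧ (gmask n k).testBit d = false) := by
        intro d
        rw [Nat.testBit_or, Bool.or_eq_false_iff]
      constructor
      · rw [hrun, ihnone]
        constructor
        · rintro ⟨d, hd, hb, hfind⟩
          obtain ⟨hb1, hb2⟩ := (hbit' d).mp hb
          exact ⟨d, hd, hb1, by rw [find?_cons_neg (fun k => (gmask n k).testBit d) k ks hb2]; exact hfind⟩
        · rintro ⟨d, hd, hb1, hfind⟩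
          have hb2 : (gmask n k).testBit d = false := by
            cases hg : (gmask n k).testBit d
            · rfl
            · rw [find?_cons_pos (fun k => (gmask n k).testBit d) k ks hg] at hfind
              exact absurd hfind (by simp)
          rw [find?_cons_neg (fun k => (gmask n k).testBit d) k ks hb2] at hfind
          exact ⟨d, hd, (hbit' d).mpr ⟨hb1, hb2⟩, hfind⟩
      · intro K hK
        rw [hrun] at hK
        obtain ⟨hbnd, hwit⟩ := ihsome K hK
        have hkK : k < K := hklt K (maskRunK_mem n ks _ K hK)
        constructor
        · intro d hd hb1
          cases hg : (gmask n k).testBit d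
          · obtain ⟨k', hfind, hle⟩ := hbnd d hd ((hbit' d).mpr ⟨hb1, hg⟩)
            exact ⟨k', by rw [find?_cons_neg (fun k => (gmask n k).testBit d) k ks hg]; exact hfind, hle⟩
          · exact ⟨k, find?_cons_pos (fun k => (gmask n k).testBit d) k ks hg, le_of_lt hkK⟩
        · obtain ⟨d, hd, hb, hfind⟩ := hwit
          obtain ⟨hb1, hb2⟩ := (hbit' d).mp hb
          exact ⟨d, hd, hb1, by rw [find?_cons_neg (fun k => (gmask n k).testBit d) k ks hb2]; exact hfind⟩

-- B's loop: failure case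
theorem altLoop_fail (n : Int) (ds : List Char) (last : Int)
    (h : ∃ d ∈ ds, altFirstK n d = none) : altLoop n ds last = "INSOMNIA" := by
  induction ds generalizing last with
  | nil => exact absurd h (by simp)
  | cons d ds ih =>
    rw [altLoop]
    cases hF : altFirstK n d with
    | none => rfl
    | some k =>
      apply ih
      obtain ⟨d', hd', hnone⟩ := h
      rcases List.mem_cons.mp hd' with rfl | hmem
      · rw [hF] at hnone; exact absurd hnone (by simp)
      · exact ⟨d', hmem, hnone⟩

-- B's loop: success case, the accumulator reaches exactly K
theorem altLoop_run (n : Int) (ds : List Char) (last K : Int)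
    (hall : ∀ d ∈ ds, ∃ k, altFirstK n d = some k ∧ k ≤ K)
    (hle : last ≤ K)
    (hwit : (∃ d ∈ ds, altFirstK n d = some K) ∨ last = K) :
    altLoop n ds last = PySem.Int.toStr (n * K) := by
  induction ds generalizing last with
  | nil =>
    rcases hwit with ⟨d, hd, _⟩ | rfl
    · exact absurd hd (by simp)
    · rfl
  | cons d ds ih =>
    obtain ⟨k, hF, hkK⟩ := hall d (by simp)
    rw [altLoop, hF]
    have hall' : ∀ d ∈ ds, ∃ k, altFirstK n d = some k ∧ k ≤ K :=
      fun d hd => hall d (by simp [hd])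
    have hle' : max last k ≤ K := max_le hle hkK
    apply ih _ hall' hle'
    rcases hwit with ⟨d', hd', hsome⟩ | rfl
    · rcases List.mem_cons.mp hd' with rfl | hmem
      · rw [hF] at hsome
        right
        have : k = K := by simpa using hsome
        subst this
        omega
      · exact Or.inl ⟨d', hmem, hsome⟩
    · right; omega

theorem digits_toList :
    "0123456789".toList = ['0','1','2','3','4','5','6','7','8','9'] := by decide

theorem mem_digits_exists (c : Char) (h : c ∈ "0123456789".toList) :
    ∃ d, d < 10 ∧ c = Nat.digitChar d := by
  rw [digits_toList] at h
  fin_cases h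
  · exact ⟨0, by norm_num, rfl⟩
  · exact ⟨1, by norm_num, rfl⟩
  · exact ⟨2, by norm_num, rfl⟩
  · exact ⟨3, by norm_num, rfl⟩
  · exact ⟨4, by norm_num, rfl⟩
  · exact ⟨5, by norm_num, rfl⟩
  · exact ⟨6, by norm_num, rfl⟩
  · exact ⟨7, by norm_num, rfl⟩
  · exact ⟨8, by norm_num, rfl⟩
  · exact ⟨9, by norm_num, rfl⟩

theorem digitChar_mem_digits : ∀ d < 10, Nat.digitChar d ∈ "0123456789".toList := by decide

-- positive case: both sides equal the match on maskRunK
theorem pos_case (n : Int) (hn : 0 < n) :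
    counting_sheep n = counting_sheep_alt n := by
  have hA : counting_sheep n =
      (match maskRunK n (PySem.List.pyRange 1 101 1) 0 with
       | some k => PySem.Int.toStr (n * k)
       | none => "INSOMNIA") := by
    unfold counting_sheep
    rw [← map_cast_eq_pyRange_a, ← map_cast_eq_pyRange_b]
    exact outer_pos n hn (List.range 100) PySem.Set.empty 0
      ⟨by norm_num, fun c => by simp [PySem.Set.empty]⟩ (by norm_num)
  have hB : counting_sheep_alt n = altLoop n "0123456789".toList 0 := by
    unfold counting_sheep_alt
    rw [if_neg (by omega)]
  obtain ⟨hnone, hsome⟩ := maskRunK_spec n (PySem.List.pyRange 1 101 1) 0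
    (by norm_num) (by norm_num) (PySem.List.pairwise_lt_pyRange_one 1 101)
  rw [hA, hB]
  cases hM : maskRunK n (PySem.List.pyRange 1 101 1) 0 with
  | none =>
    obtain ⟨d, hd, _, hfind⟩ := hnone.mp hM
    refine (altLoop_fail n _ 0 ⟨Nat.digitChar d, digitChar_mem_digits d hd, ?_⟩).symm
    rw [altFirstK_eq n hn d hd, hfind]
  | some K =>
    obtain ⟨hbnd, hwit⟩ := hsome K hM
    have hK1 : 1 ≤ K :=
      (PySem.List.mem_pyRange_one.mp (maskRunK_mem n _ _ K hM)).1
    refine (altLoop_run n _ 0 K ?_ (by omega) ?_).symm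
    · intro c hc
      obtain ⟨d, hd, rfl⟩ := mem_digits_exists c hc
      obtain ⟨k, hfind, hle⟩ := hbnd d hd (Nat.zero_testBit d)
      exact ⟨k, by rw [altFirstK_eq n hn d hd]; exact hfind, hle⟩
    · left
      obtain ⟨d, hd, _, hfind⟩ := hwit
      exact ⟨Nat.digitChar d, digitChar_mem_digits d hd,
        by rw [altFirstK_eq n hn d hd]; exact hfind⟩

-- ===== VERDICT (by name: the statement is the Claim_ definition above) =====
theorem counting_sheep_spec : Claim_equal_counting_sheep := by
  intro number _
  unfold Spec_counting_sheep
  rcases lt_trichotomy number 0 with hneg | hzero | hpos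
  · rw [show counting_sheep_alt number = "INSOMNIA" by
      unfold counting_sheep_alt; rw [if_pos (le_of_lt hneg)]]
    exact outer_neg number hneg _ (fun i hi => (PySem.List.mem_pyRange_one.mp hi).1)
      PySem.Set.empty (Or.inr rfl)
  · subst hzero
    rw [show counting_sheep_alt 0 = "INSOMNIA" from rfl]
    exact counting_sheep_zero
  · exact pos_case number hpos
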